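-- pv_equiv track=rewrite | github.com/robukleonid6-wq/Oaip_Robuk | Отчеты_по_ЛР/KR/2KR.py | find_places
-- ===== SOURCE A (Python) =====
-- def find_places(zal, n):
--     for i, r in enumerate(zal):
--         c = 0
--         s = 0
--         for j, m in enumerate(r):
--             if m == 0:
--                 if c == 0:
--                     s = j
--                 c += 1
--                 if c == n:
--                     return f"ряд {i+1}, места с {s+1} пo {s+n}"
--             else:
--                 c = 0
--     return "вместе не сядете"
-- ===== SOURCE B (Python) =====
-- def find_places(zal, n):
--     # A group of n people needs n >= 1 seats; gaps between blockers are checked by size.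
--     if n >= 1:
--         for i, row in enumerate(zal):
--             bounds = [-1] + [j for j, m in enumerate(row) if m != 0] + [len(row)]
--             for a, b in zip(bounds, bounds[1:]):
--                 if b - a - 1 >= n:
--                     return f"ряд {i+1}, места с {a+2} пo {a+n+1}"
--     return "вместе не сядете"
-- ===== Notes on version B (the rewrite author's own statement) =====
-- stated objective: alternative
-- what changed: Instead of A's stateful seat-by-seat scan with a run counter, B first materializes per row the list of occupied-seat indices with sentinels -1 and len(row), then checks consecutive blocker pairs for a gap of size >= n (guarded by n >= 1, since a zero-width gap would trivially satisfy a non-positive n).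
import Mathlib
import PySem

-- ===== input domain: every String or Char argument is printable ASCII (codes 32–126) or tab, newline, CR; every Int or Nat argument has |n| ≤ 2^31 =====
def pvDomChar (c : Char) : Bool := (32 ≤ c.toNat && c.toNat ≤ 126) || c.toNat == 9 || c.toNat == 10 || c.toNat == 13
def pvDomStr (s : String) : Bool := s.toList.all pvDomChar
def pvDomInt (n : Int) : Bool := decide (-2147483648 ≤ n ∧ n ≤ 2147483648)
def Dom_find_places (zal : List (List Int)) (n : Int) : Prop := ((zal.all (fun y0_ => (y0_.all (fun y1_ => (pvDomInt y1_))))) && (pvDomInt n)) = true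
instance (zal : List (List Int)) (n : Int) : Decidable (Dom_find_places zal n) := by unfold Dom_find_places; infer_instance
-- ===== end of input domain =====

-- B replaces A's stateful run-tracking scan by a staged pass: it first builds the row's list of
-- occupied-seat indices (with sentinels -1 and len(row)) and then scans consecutive blocker pairs
-- for a gap of size ≥ n; same return value.

-- ===== PORT A =====
-- shared output formatting (the f-string; the second letter of "пo" is Latin 'o' as in the source)
def pvMsg (row a b : Int) : String :=
  "ряд " ++ PySem.Int.toStr row ++ ", места с " ++ PySem.Int.toStr a ++ " пo " ++ PySem.Int.toStr b

-- inner for-loop of A over one row: j = enumerate index, c = run length, s = run start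
def pvAInner (i : Nat) (n : Int) : List Int → Nat → Int → Int → Option String
  | [], _, _, _ => none
  | m :: rest, j, c, s =>
    if m = 0 then
      let s' := if c = 0 then (j : Int) else s
      if c + 1 = n then some (pvMsg ((i : Int) + 1) (s' + 1) (s' + n))
      else pvAInner i n rest (j + 1) (c + 1) s'
    else pvAInner i n rest (j + 1) 0 s

def pvARows (n : Int) : List (List Int) → Nat → String
  | [], _ => "вместе не сядете"
  | r :: rs, i =>
    match pvAInner i n r 0 0 0 with
    | some out => out
    | none => pvARows n rs (i + 1)

def find_places (zal : List (List Int)) (n : Int) : String := pvARows n zal 0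

-- ===== PORT B =====
-- the list comprehension [j for j, m in enumerate(row) if m != 0]
def pvBlocked : List Int → Nat → List Int
  | [], _ => []
  | m :: rest, j => if m ≠ 0 then (j : Int) :: pvBlocked rest (j + 1) else pvBlocked rest (j + 1)

-- the loop over zip(bounds, bounds[1:]): a = left bound, list = remaining bounds
def pvScan (i : Nat) (n : Int) : Int → List Int → Option String
  | _, [] => none
  | a, b :: rest =>
    if b - a - 1 ≥ n then some (pvMsg ((i : Int) + 1) (a + 2) (a + n + 1))
    else pvScan i n b rest

def pvBRow (i : Nat) (n : Int) (row : List Int) : Option String :=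
  pvScan i n (-1) (pvBlocked row 0 ++ [(row.length : Int)])

def pvBRows (n : Int) : List (List Int) → Nat → String
  | [], _ => "вместе не сядете"
  | r :: rs, i =>
    match pvBRow i n r with
    | some out => out
    | none => pvBRows n rs (i + 1)

def find_places_alt (zal : List (List Int)) (n : Int) : String :=
  if 1 ≤ n then pvBRows n zal 0 else "вместе не сядете"

-- ===== PRECONDITION & SPEC =====
def Spec_find_places (zal : List (List Int)) (n : Int) (out : String) : Prop := out = find_places_alt zal n
instance (zal : List (List Int)) (n : Int) (out : String) : Decidable (Spec_find_places zal n out) := by unfold Spec_find_places; infer_instance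

-- ===== CLAIM =====
def Claim_equal_find_places : Prop := ∀ (zal : List (List Int)) (n : Int), Dom_find_places zal n → Spec_find_places zal n (find_places zal n)

-- ===== LEMMAS AND PROOFS =====
theorem pvBlocked_ge : ∀ (rest : List Int) (j : Nat) (x : Int), x ∈ pvBlocked rest j → (j : Int) ≤ x := by
  intro rest
  induction rest with
  | nil => intro j x h; simp [pvBlocked] at h
  | cons m t ih =>
    intro j x h
    simp only [pvBlocked] at h
    by_cases hm : m ≠ 0
    · rw [if_pos hm] at h
      rcases List.mem_cons.mp h with h | h
      · omega
      · have := ih (j + 1) x h; push_cast at this ⊢; omega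
    · rw [if_neg hm] at h
      have := ih (j + 1) x h; push_cast at this ⊢; omega

theorem pvInner_eq (i : Nat) (n : Int) (hn : 1 ≤ n) : ∀ (rest : List Int) (j : Nat) (c s : Int),
    0 ≤ c → c < n → (c = 0 ∨ s = (j : Int) - c) →
    pvAInner i n rest j c s = pvScan i n ((j : Int) - c - 1) (pvBlocked rest j ++ [(j : Int) + rest.length]) := by
  intro rest
  induction rest with
  | nil =>
    intro j c s hc hcn hs
    simp only [pvAInner, pvBlocked, List.nil_append, List.length_nil, pvScan]
    rw [if_neg (by omega)]
  | cons m t ih =>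
    intro j c s hc hcn hs
    simp only [pvAInner, pvBlocked]
    by_cases hm : m = 0
    · simp only [hm, ne_eq, not_true_eq_false, if_false, if_pos trivial]
      have hs' : (if c = 0 then (j : Int) else s) = (j : Int) - c := by
        rcases hs with h | h
        · simp [h]
        · by_cases h0 : c = 0 <;> simp [h0, h]
      by_cases hf : c + 1 = n
      · -- A fires; B's first gap is wide enough
        rw [if_pos hf, hs']
        cases hb : pvBlocked t (j + 1) with
        | nil =>
          simp only [List.nil_append, pvScan, List.length_cons]
          rw [if_pos (by push_cast; omega)]
          have h1 : (j : Int) - c - 1 + 2 = (j : Int) - c + 1 := by omega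
          have h2 : (j : Int) - c - 1 + n + 1 = (j : Int) - c + n := by omega
          rw [h1, h2]
        | cons b bs =>
          have hbge : ((j : Nat) + 1 : Int) ≤ b :=
            pvBlocked_ge t (j + 1) b (by rw [hb]; exact List.mem_cons_self ..)
          simp only [List.cons_append, pvScan]
          rw [if_pos (by push_cast at hbge; omega)]
          have h1 : (j : Int) - c - 1 + 2 = (j : Int) - c + 1 := by omega
          have h2 : (j : Int) - c - 1 + n + 1 = (j : Int) - c + n := by omega
          rw [h1, h2]
      · -- A continues with c+1; B's gap list is unchanged
        rw [if_neg hf]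
        have := ih (j + 1) (c + 1) (if c = 0 then (j : Int) else s) (by omega) (by omega)
          (Or.inr (by rw [hs']; push_cast; omega))
        rw [this]
        congr 1
        · push_cast; omega
        · congr 1; congr 1; push_cast [List.length_cons]; omega
    · -- blocker at j: B consumes one gap of width c < n, A resets c
      simp only [ne_eq, hm, not_false_eq_true, if_true, if_false]
      have := ih (j + 1) 0 s (le_rfl) (by omega) (Or.inl rfl)
      rw [this]
      simp only [List.cons_append, pvScan]
      rw [if_neg (by omega)]
      congr 1
      · push_cast; omega
      · congr 1; congr 1; push_cast [List.length_cons]; omega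

theorem pvRows_eq (n : Int) (hn : 1 ≤ n) (zal : List (List Int)) :
    ∀ i : Nat, pvARows n zal i = pvBRows n zal i := by
  induction zal with
  | nil => intro i; rfl
  | cons r rs ih =>
    intro i
    simp only [pvARows, pvBRows, pvBRow]
    have h := pvInner_eq i n hn r 0 0 0 le_rfl (by omega) (Or.inl rfl)
    simp only [Nat.cast_zero, zero_add] at h
    have hz : (0 : Int) - 0 - 1 = -1 := by omega
    rw [hz] at h
    rw [h]
    cases pvScan i n (-1) (pvBlocked r 0 ++ [(r.length : Int)]) with
    | none => exact ih (i + 1)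
    | some out => rfl

theorem pvAInner_none (i : Nat) (n : Int) (hn : n < 1) : ∀ (rest : List Int) (j : Nat) (c s : Int),
    0 ≤ c → pvAInner i n rest j c s = none := by
  intro rest
  induction rest with
  | nil => intro j c s _; rfl
  | cons m t ih =>
    intro j c s hc
    simp only [pvAInner]
    by_cases hm : m = 0
    · simp only [hm, if_pos trivial]
      rw [if_neg (by omega)]
      exact ih (j + 1) (c + 1) _ (by omega)
    · rw [if_neg hm]
      exact ih (j + 1) 0 s le_rfl

theorem pvARows_default (n : Int) (hn : n < 1) (zal : List (List Int)) :
    ∀ i : Nat, pvARows n zal i = "вместе не сядете" := by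
  induction zal with
  | nil => intro i; rfl
  | cons r rs ih =>
    intro i
    simp only [pvARows]
    rw [pvAInner_none i n hn r 0 0 0 le_rfl]
    exact ih (i + 1)

-- ===== VERDICT =====
theorem find_places_spec : Claim_equal_find_places := by
  intro zal n _
  unfold Spec_find_places find_places find_places_alt
  by_cases hn : 1 ≤ n
  · rw [if_pos hn]; exact pvRows_eq n hn zal 0
  · rw [if_neg hn]; exact pvARows_default n (by omega) zal 0
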